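-- pv_equiv track=rewrite | github.com/pypi-data/pypi-mirror-354 | packages/Gormley-PETRAFT/gormley_petraft-0.1.0-py3-none-any.whl/Gormley_PETRAFT/Synthesis_scriptor.py | adjust_volumes_for_pipetting
-- ===== SOURCE A (Python) =====
-- def adjust_volumes_for_pipetting(volumes, pickup_pos, drop_off_pos, max_volume=300):
--     # Need to fix this to append the things to the end as of now bc it slows down the robot this way
--     """
--     Adjusts the volumes array to fit the pipetting limits and updates the corresponding pickup and dropoff arrays.
--
--     Args:
--     volumes (list): Array of volumes.
--     pickup_pos (list): Corresponding pickup positions.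
--     drop_off_pos (list): Corresponding drop-off positions.
--     max_volume (int): Maximum volume that can be handled per operation.
--
--     Returns:
--     tuple: Updated arrays of volumes, pickup positions, and drop-off positions.
--     """
--     # Initialize the output lists
--     adjusted_volumes = []
--     adjusted_pickup_pos = []
--     adjusted_drop_off_pos = []
--
--     # Iterate over each volume and its corresponding positions
--     for volume, pickup, drop_off in zip(volumes, pickup_pos, drop_off_pos):
--         while volume > max_volume:
--             adjusted_volumes.append(max_volume)
--             adjusted_pickup_pos.append(pickup)
--             adjusted_drop_off_pos.append(drop_off)
--             volume -= max_volume
--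
--         # Append the remainder volume if any
--         if volume > 0:
--             adjusted_volumes.append(volume)
--             adjusted_pickup_pos.append(pickup)
--             adjusted_drop_off_pos.append(drop_off)
--
--     return adjusted_volumes, adjusted_pickup_pos, adjusted_drop_off_pos
-- ===== SOURCE B (Python) =====
-- def adjust_volumes_for_pipetting(volumes, pickup_pos, drop_off_pos, max_volume=300):
--     adjusted_volumes = []
--     adjusted_pickup_pos = []
--     adjusted_drop_off_pos = []
--     for volume, pickup, drop_off in zip(volumes, pickup_pos, drop_off_pos):
--         if volume <= 0:
--             continue
--         full, rest = divmod(volume, max_volume)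
--         adjusted_volumes.extend([max_volume] * full)
--         adjusted_pickup_pos.extend([pickup] * full)
--         adjusted_drop_off_pos.extend([drop_off] * full)
--         if rest > 0:
--             adjusted_volumes.append(rest)
--             adjusted_pickup_pos.append(pickup)
--             adjusted_drop_off_pos.append(drop_off)
--     return adjusted_volumes, adjusted_pickup_pos, adjusted_drop_off_pos
-- ===== Notes on version B (the rewrite author's own statement) =====
-- stated objective: idiomatic
-- what changed: Replaces the repeated-subtraction while loop by a closed-form divmod: the chunk count and remainder are computed once and the output lists are extended by list multiplication.
import Mathlib
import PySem

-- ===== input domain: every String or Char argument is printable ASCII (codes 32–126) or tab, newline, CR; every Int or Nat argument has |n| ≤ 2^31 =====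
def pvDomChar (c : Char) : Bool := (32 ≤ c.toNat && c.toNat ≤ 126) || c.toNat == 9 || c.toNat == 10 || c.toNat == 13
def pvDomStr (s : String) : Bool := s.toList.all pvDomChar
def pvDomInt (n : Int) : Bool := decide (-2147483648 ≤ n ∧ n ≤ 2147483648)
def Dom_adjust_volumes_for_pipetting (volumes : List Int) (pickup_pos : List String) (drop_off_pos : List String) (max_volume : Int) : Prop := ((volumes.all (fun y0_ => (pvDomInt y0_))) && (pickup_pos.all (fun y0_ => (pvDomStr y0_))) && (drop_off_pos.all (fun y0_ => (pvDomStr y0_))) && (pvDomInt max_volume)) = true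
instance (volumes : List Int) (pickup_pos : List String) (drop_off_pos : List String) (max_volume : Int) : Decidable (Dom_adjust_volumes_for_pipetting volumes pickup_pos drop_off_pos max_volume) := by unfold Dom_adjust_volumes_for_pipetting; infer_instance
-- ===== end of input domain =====

-- B replaces A's repeated-subtraction while loop by a single divmod per item (idiomatic; return value only, no mutation).

-- ===== PORT A =====
-- A's inner `while volume > max_volume` loop; the extra `0 < max_volume` conjunct in the
-- guard is a termination guard only: Python A diverges when the loop is entered with
-- max_volume ≤ 0, and such inputs are excluded by Pre_ below.
def pvChunkA (volume max_volume : Int) (pickup drop : String) : List Int × List String × List String :=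
  if _h : max_volume < volume ∧ 0 < max_volume then
    let r := pvChunkA (volume - max_volume) max_volume pickup drop
    (max_volume :: r.1, pickup :: r.2.1, drop :: r.2.2)
  else if 0 < volume then ([volume], [pickup], [drop])
  else ([], [], [])
termination_by volume.toNat
decreasing_by simp_wf; omega

def pvLoopA (max_volume : Int) : List (Int × String × String) → List Int × List String × List String
  | [] => ([], [], [])
  | (v, p, d) :: rest =>
      let c := pvChunkA v max_volume p d
      let r := pvLoopA max_volume rest
      (c.1 ++ r.1, c.2.1 ++ r.2.1, c.2.2 ++ r.2.2)

def adjust_volumes_for_pipetting (volumes : List Int) (pickup_pos : List String) (drop_off_pos : List String) (max_volume : Int) : List Int × List String × List String :=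
  pvLoopA max_volume (volumes.zip (pickup_pos.zip drop_off_pos))

-- ===== PORT B =====
def pvLoopB (max_volume : Int) : List (Int × String × String) → List Int × List String × List String
  | [] => ([], [], [])
  | (v, p, d) :: rest =>
      let r := pvLoopB max_volume rest
      if v ≤ 0 then r
      else
        let full := (PySem.Int.floordiv v max_volume).toNat
        let rem := PySem.Int.mod v max_volume
        if 0 < rem then
          (List.replicate full max_volume ++ rem :: r.1,
           List.replicate full p ++ p :: r.2.1,
           List.replicate full d ++ d :: r.2.2)
        else
          (List.replicate full max_volume ++ r.1,
           List.replicate full p ++ r.2.1,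
           List.replicate full d ++ r.2.2)

def adjust_volumes_for_pipetting_alt (volumes : List Int) (pickup_pos : List String) (drop_off_pos : List String) (max_volume : Int) : List Int × List String × List String :=
  pvLoopB max_volume (volumes.zip (pickup_pos.zip drop_off_pos))

-- ===== PRECONDITION & SPEC =====
-- Pre_ excludes exactly the inputs on which Python A DIVERGES: max_volume ≤ 0 while some
-- volume in the zipped range exceeds max_volume makes A's while loop run forever.
def Pre_adjust_volumes_for_pipetting (volumes : List Int) (pickup_pos : List String) (drop_off_pos : List String) (max_volume : Int) : Prop :=
  0 < max_volume ∨ ∀ v ∈ volumes.take (min pickup_pos.length drop_off_pos.length), v ≤ max_volume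
instance (volumes : List Int) (pickup_pos : List String) (drop_off_pos : List String) (max_volume : Int) : Decidable (Pre_adjust_volumes_for_pipetting volumes pickup_pos drop_off_pos max_volume) := by unfold Pre_adjust_volumes_for_pipetting; infer_instance

def pvWitness_adjust_volumes_for_pipetting : List Int × List String × List String × Int := ([5, 301, -2], ["a", "b", "c"], ["x", "y", "z"], 300)

def Spec_adjust_volumes_for_pipetting (volumes : List Int) (pickup_pos : List String) (drop_off_pos : List String) (max_volume : Int) (out : List Int × List String × List String) : Prop := out = adjust_volumes_for_pipetting_alt volumes pickup_pos drop_off_pos max_volume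
instance (volumes : List Int) (pickup_pos : List String) (drop_off_pos : List String) (max_volume : Int) (out : List Int × List String × List String) : Decidable (Spec_adjust_volumes_for_pipetting volumes pickup_pos drop_off_pos max_volume out) := by unfold Spec_adjust_volumes_for_pipetting; infer_instance

-- ===== CLAIM (what is proved, stated in full; the proofs are below) =====
def Claim_equal_adjust_volumes_for_pipetting : Prop := ∀ (volumes : List Int) (pickup_pos : List String) (drop_off_pos : List String) (max_volume : Int), Dom_adjust_volumes_for_pipetting volumes pickup_pos drop_off_pos max_volume → Pre_adjust_volumes_for_pipetting volumes pickup_pos drop_off_pos max_volume → Spec_adjust_volumes_for_pipetting volumes pickup_pos drop_off_pos max_volume (adjust_volumes_for_pipetting volumes pickup_pos drop_off_pos max_volume)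

-- ===== LEMMAS AND PROOFS =====

-- A's while loop on one positive item equals B's divmod expansion (0 < max_volume case).
theorem pvChunk_pos (v m : Int) (p d : String) (hm : 0 < m) (hv : 0 < v) :
    pvChunkA v m p d =
      ((List.replicate (PySem.Int.floordiv v m).toNat m ++ (if 0 < PySem.Int.mod v m then [PySem.Int.mod v m] else [])),
       (List.replicate (PySem.Int.floordiv v m).toNat p ++ (if 0 < PySem.Int.mod v m then [p] else [])),
       (List.replicate (PySem.Int.floordiv v m).toNat d ++ (if 0 < PySem.Int.mod v m then [d] else []))) := by
  fun_induction pvChunkA v m p d with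
  | case1 a hg r ih =>
    obtain ⟨hma, _⟩ := hg
    rw [show r = pvChunkA (a - m) m p d from rfl, ih (by omega)]
    rw [PySem.Int.floordiv_eq_ediv_of_pos hm, PySem.Int.mod_eq_emod_of_pos hm,
        PySem.Int.floordiv_eq_ediv_of_pos hm, PySem.Int.mod_eq_emod_of_pos hm]
    have hdiv : (a - m) / m = a / m - 1 := by
      have := Int.add_mul_ediv_right a (-1) (by omega : m ≠ 0)
      simpa [sub_eq_add_neg] using this
    have hmod : (a - m) % m = a % m := Int.sub_emod_right a m
    have hq1 : 1 ≤ a / m := by rw [Int.le_ediv_iff_mul_le hm]; omega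
    have htn : (a / m).toNat = ((a - m) / m).toNat + 1 := by rw [hdiv]; omega
    rw [htn, hmod, List.replicate_succ]
    simp [List.replicate_succ, List.cons_append]
  | case2 a hng hpos =>
    have hvm : a ≤ m := by omega
    by_cases heq : a = m
    · subst heq
      rw [PySem.Int.floordiv_eq_ediv_of_pos hm, PySem.Int.mod_eq_emod_of_pos hm,
          Int.ediv_self (by omega : a ≠ 0), Int.emod_self]
      simp
    · have hlt : a < m := by omega
      rw [PySem.Int.floordiv_eq_ediv_of_pos hm, PySem.Int.mod_eq_emod_of_pos hm,
          Int.ediv_eq_zero_of_lt (by omega) hlt, Int.emod_eq_of_lt (by omega) hlt]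
      simp [hpos]
  | case3 a hng hnpos => omega

-- One item's chunks: A's while loop equals B's divmod expansion, given the per-item
-- precondition (0 < max_volume, or this volume never enters the loop).
theorem pvChunk_eq (v m : Int) (p d : String) (h : 0 < m ∨ v ≤ m) :
    pvChunkA v m p d =
      (if v ≤ 0 then ([], [], [])
       else ((List.replicate (PySem.Int.floordiv v m).toNat m ++ (if 0 < PySem.Int.mod v m then [PySem.Int.mod v m] else [])),
             (List.replicate (PySem.Int.floordiv v m).toNat p ++ (if 0 < PySem.Int.mod v m then [p] else [])),
             (List.replicate (PySem.Int.floordiv v m).toNat d ++ (if 0 < PySem.Int.mod v m then [d] else [])))) := by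
  by_cases hv : v ≤ 0
  · rw [pvChunkA]
    have hguard : ¬(m < v ∧ 0 < m) := by omega
    have hnp : ¬0 < v := by omega
    simp [hguard, hv, hnp]
  · have hm : 0 < m := by rcases h with h | h <;> omega
    rw [if_neg hv]
    exact pvChunk_pos v m p d hm (by omega)

theorem pvLoop_eq (m : Int) (vs : List Int) (ps ds : List String)
    (h : 0 < m ∨ ∀ v ∈ vs.take (min ps.length ds.length), v ≤ m) :
    pvLoopA m (vs.zip (ps.zip ds)) = pvLoopB m (vs.zip (ps.zip ds)) := by
  induction vs generalizing ps ds with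
  | nil => simp [pvLoopA, pvLoopB]
  | cons v vs ih =>
    cases ps with
    | nil => simp [pvLoopA, pvLoopB]
    | cons p ps =>
      cases ds with
      | nil => simp [pvLoopA, pvLoopB]
      | cons d ds =>
        have hhead : 0 < m ∨ v ≤ m := by
          rcases h with h | h
          · exact Or.inl h
          · refine Or.inr (h v ?_)
            simp [Nat.succ_min_succ, List.take_succ_cons]
        have htail : 0 < m ∨ ∀ x ∈ vs.take (min ps.length ds.length), x ≤ m := by
          rcases h with h | h
          · exact Or.inl h
          · refine Or.inr fun x hx => h x ?_
            simp only [List.length_cons, Nat.succ_min_succ, List.take_succ_cons]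
            exact List.mem_cons_of_mem _ hx
        simp only [List.zip_cons_cons, pvLoopA, pvLoopB, ih ps ds htail, pvChunk_eq v m p d hhead]
        by_cases hv : v ≤ 0
        · simp [hv]
        · by_cases hr : 0 < PySem.Int.mod v m <;> simp [hv, hr]

theorem adjust_volumes_for_pipetting_spec : Claim_equal_adjust_volumes_for_pipetting := by
  intro vs ps ds m _ hpre
  unfold Spec_adjust_volumes_for_pipetting adjust_volumes_for_pipetting adjust_volumes_for_pipetting_alt
  exact pvLoop_eq m vs ps ds hpre
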